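-- pv_equiv track=rewrite | github.com/J-H-C-037/Subject-EDA | EDA/finals/Divide&Conquer.py | short
-- ===== SOURCE A (Python) =====
-- def short(l:list):
--     if len(l) == 0:
--         return l
--
--     l3 = []
--
--     mid = len(l)//2
--     if len(l[mid]) <= 2:
--         l3.append(l[mid])
--
--     l1 = short(l[:mid])
--     l2 = short(l[mid + 1:])
--
--     return l3 + l1 + l2
-- ===== SOURCE B (Python) =====
-- def short(l: list):
--     res = []
--     stack = [(0, len(l))]
--     while stack:
--         lo, hi = stack.pop()
--         if lo >= hi:
--             continue
--         mid = (lo + hi) // 2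
--         if len(l[mid]) <= 2:
--             res.append(l[mid])
--         stack.append((mid + 1, hi))
--         stack.append((lo, mid))
--     return res
-- ===== Notes on version B (the rewrite author's own statement) =====
-- stated objective: alternative
-- what changed: Replaces A's recursion with list slicing (which copies sublists at every level) by an iterative explicit stack of (lo, hi) index ranges over the original list, pushing right-then-left so the middle-root preorder is preserved.
import Mathlib
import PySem

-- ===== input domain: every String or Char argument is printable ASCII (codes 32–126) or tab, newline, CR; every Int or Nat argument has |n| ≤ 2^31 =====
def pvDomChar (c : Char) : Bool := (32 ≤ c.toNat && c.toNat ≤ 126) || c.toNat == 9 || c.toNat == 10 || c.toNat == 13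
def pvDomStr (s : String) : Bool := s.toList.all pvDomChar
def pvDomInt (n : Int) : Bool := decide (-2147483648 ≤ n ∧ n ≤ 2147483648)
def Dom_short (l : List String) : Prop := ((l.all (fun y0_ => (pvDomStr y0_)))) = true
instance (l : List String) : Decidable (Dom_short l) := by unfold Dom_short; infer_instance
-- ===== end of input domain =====

-- B replaces A's slicing recursion by an iterative explicit stack of (lo, hi) index
-- ranges over the original list (no sublist copies); same middle-root preorder output.


-- ===== PORT A =====
-- A's recursion, with a structural fuel argument as totality guard
-- (fuel ≥ l.length always suffices: each recursive call is on a strictly shorter slice)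
def shortGo (fuel : Nat) (l : List String) : List String :=
  match fuel with
  | 0 => l   -- unreachable for fuel ≥ l.length
  | fuel + 1 =>
    if l.length = 0 then l
    else
      let mid := l.length / 2
      let l3 : List String :=
        match PySem.List.pyGet? l (mid : Int) with   -- l[mid]; in range here, so never none
        | some s => if PySem.Str.len s ≤ 2 then [s] else []
        | none => []
      let l1 := shortGo fuel (PySem.List.slice l none (some (mid : Int)))          -- l[:mid]
      let l2 := shortGo fuel (PySem.List.slice l (some ((mid : Int) + 1)) none)    -- l[mid+1:]
      l3 ++ l1 ++ l2

def short (l : List String) : List String := shortGo l.length l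

-- ===== PORT B =====
-- stack is Python's list used as a stack, top first (Python appends/pops at the end);
-- fuel is a structural totality guard (the loop runs at most 2*l.length + 1 times)
def shortLoop (l : List String) (fuel : Nat) (stack : List (Nat × Nat)) (res : List String) : List String :=
  match fuel, stack with
  | _, [] => res
  | 0, _ => res   -- unreachable for fuel ≥ Σ (2*(hi-lo)+1) over the stack
  | fuel + 1, (lo, hi) :: st =>
    if lo ≥ hi then shortLoop l fuel st res
    else
      let mid := (lo + hi) / 2
      let res' := if PySem.Str.len (PySem.List.pyGetD l (mid : Int) "") ≤ 2
                  then res ++ [PySem.List.pyGetD l (mid : Int) ""] else res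
      shortLoop l fuel ((lo, mid) :: (mid + 1, hi) :: st) res'

def short_alt (l : List String) : List String :=
  shortLoop l (2 * l.length + 1) [(0, l.length)] []

-- ===== PRECONDITION & SPEC =====
def Spec_short (l : List String) (out : List String) : Prop := out = short_alt l
instance (l : List String) (out : List String) : Decidable (Spec_short l out) := by unfold Spec_short; infer_instance

-- ===== CLAIM (what is proved, stated in full; the proofs are below) =====
def Claim_equal_short : Prop := ∀ (l : List String), Dom_short l → Spec_short l (short l)

-- ===== LEMMAS AND PROOFS =====

-- the list A's recursion produces for the index range [lo, hi) of l
def seg (l : List String) (lo hi : Nat) : List String :=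
  if lo ≥ hi then []
  else
    let mid := (lo + hi) / 2
    (if PySem.Str.len (l.getD mid "") ≤ 2 then [l.getD mid ""] else [])
      ++ seg l lo mid ++ seg l (mid + 1) hi
termination_by hi - lo
decreasing_by all_goals omega

def stMeasure (st : List (Nat × Nat)) : Nat := (st.map (fun p => 2 * (p.2 - p.1) + 1)).sum

theorem shortLoop_eq (l : List String) (fuel : Nat) (stack : List (Nat × Nat)) (res : List String)
    (hf : stMeasure stack ≤ fuel) :
    shortLoop l fuel stack res = res ++ (stack.map (fun p => seg l p.1 p.2)).flatten := by
  induction fuel generalizing stack res with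
  | zero =>
    match stack with
    | [] => simp [shortLoop]
    | (lo, hi) :: st =>
      exfalso
      simp only [stMeasure, List.map_cons, List.sum_cons] at hf
      omega
  | succ fuel ih =>
    match stack with
    | [] => simp [shortLoop]
    | (lo, hi) :: st =>
      simp only [stMeasure, List.map_cons, List.sum_cons] at hf
      rw [shortLoop]
      by_cases hge : lo ≥ hi
      · simp only [if_pos hge]
        rw [ih st res (by simp only [stMeasure]; omega)]
        simp only [List.map_cons, List.flatten_cons]
        rw [seg, if_pos hge]
        simp
      · simp only [if_neg hge]
        have hmid : (lo + hi) / 2 < hi ∧ lo ≤ (lo + hi) / 2 := by omega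
        rw [ih ((lo, (lo + hi) / 2) :: ((lo + hi) / 2 + 1, hi) :: st) _
              (by simp only [stMeasure, List.map_cons, List.sum_cons]; omega)]
        simp only [List.map_cons, List.flatten_cons]
        conv_rhs => rw [seg]
        simp only [if_neg hge]
        simp only [PySem.List.pyGetD_natCast]
        split_ifs <;> simp

theorem shortGo_sub_eq (l : List String) (fuel lo hi : Nat) (hhi : hi ≤ l.length)
    (hf : hi - lo ≤ fuel) :
    shortGo fuel ((l.drop lo).take (hi - lo)) = seg l lo hi := by
  induction fuel generalizing lo hi with
  | zero =>
    have h0 : hi - lo = 0 := by omega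
    rw [h0, seg, if_pos (by omega)]
    simp [shortGo]
  | succ fuel ih =>
    by_cases hge : lo ≥ hi
    · have h0 : hi - lo = 0 := by omega
      rw [h0, seg, if_pos hge]
      simp [shortGo]
    · rw [ge_iff_le, Nat.not_le] at hge
      have hn : ((l.drop lo).take (hi - lo)).length = hi - lo := by
        simp only [List.length_take, List.length_drop]; omega
      rw [seg, if_neg (by omega)]
      rw [shortGo]
      rw [if_neg (by omega)]
      set sub := (l.drop lo).take (hi - lo) with hsub
      have hmid : sub.length / 2 = (hi - lo) / 2 := by rw [hn]
      have hm2 : lo + (hi - lo) / 2 = (lo + hi) / 2 := by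
        have h : lo + hi = 2 * lo + (hi - lo) := by omega
        rw [h, Nat.mul_add_div (by norm_num)]
      have hmlt : (hi - lo) / 2 < hi - lo := by omega
      -- the middle element
      have hget : PySem.List.pyGet? sub ((sub.length / 2 : Nat) : Int)
          = some (l.getD ((lo + hi) / 2) "") := by
        rw [PySem.List.pyGet?_natCast, hmid]
        have h1 : sub[(hi - lo) / 2]? = (l.drop lo)[(hi - lo) / 2]? := by
          rw [hsub, List.getElem?_take_of_lt hmlt]
        rw [h1, List.getElem?_drop, hm2]
        have hlt2 : (lo + hi) / 2 < l.length := by omega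
        rw [List.getElem?_eq_getElem hlt2, List.getD_eq_getElem?_getD,
            List.getElem?_eq_getElem hlt2]
        simp
      -- the left slice
      have hleft : PySem.List.slice sub none (some ((sub.length / 2 : Nat) : Int))
          = (l.drop lo).take ((lo + hi) / 2 - lo) := by
        rw [PySem.List.slice_to_natCast, hmid, hsub, List.take_take]
        congr 1; omega
      -- the right slice
      have hright : PySem.List.slice sub (some (((sub.length / 2 : Nat) : Int) + 1)) none
          = (l.drop ((lo + hi) / 2 + 1)).take (hi - ((lo + hi) / 2 + 1)) := by
        have h : (((sub.length / 2 : Nat) : Int) + 1) = (((sub.length / 2 + 1 : Nat)) : Int) := by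
          push_cast; ring
        rw [h, PySem.List.slice_from_natCast, hmid, hsub, List.drop_take, List.drop_drop]
        congr 1
        · omega
        · congr 1
          omega
      simp only [hget, hleft, hright]
      rw [ih lo ((lo + hi) / 2) (by omega) (by omega),
          ih ((lo + hi) / 2 + 1) hi hhi (by omega)]

-- ===== VERDICT (by name: the statement is the Claim_ definition above) =====
theorem short_spec : Claim_equal_short := by
  intro l _
  unfold Spec_short short_alt
  rw [shortLoop_eq l _ _ _ (by simp only [stMeasure, List.map_cons, List.map_nil,
    List.sum_cons, List.sum_nil]; omega)]
  simp only [List.map_cons, List.map_nil, List.flatten_cons, List.flatten_nil,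
    List.nil_append, List.append_nil]
  unfold short
  rw [← shortGo_sub_eq l l.length 0 l.length (le_refl _) (by omega)]
  simp
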